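-- pv_equiv track=rewrite | github.com/engag1ng/BWINF-43 | Runde 2/Aufgabe 3 - Implementierung/aufgabe3.py | find_hotspot
-- ===== SOURCE A (Python) =====
-- def is_True(string):
--     """Returns whether a STRING either 'y' or '?' which is counted as True."""
--     return string == "y" or string == '?'
--
-- def find_hotspot(lst):
--     """Finds the hotspot of True values in a row. This means that at the hotspot there is an equal distribution of True's to either side."""
--     n = len(lst)
--     min_diff = float('inf')
--     hotspot_index = -1
--
--     for i in range(n):
--         left_count = sum(1 for x in lst[:i] if is_True(x))
--         right_count = sum(1 for x in lst[i+1:] if is_True(x))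
--
--         diff = abs(left_count - right_count)
--
--         if diff < min_diff:
--             min_diff = diff
--             hotspot_index = i
--
--     return hotspot_index
-- ===== SOURCE B (Python) =====
-- def is_True(string):
--     """Returns whether a STRING either 'y' or '?' which is counted as True."""
--     return string == "y" or string == '?'
--
-- def find_hotspot(lst):
--     """Single pass: total True count once, running left count, O(1) diff per index."""
--     total = sum(1 for x in lst if is_True(x))
--     best_diff = -1
--     best_index = -1
--     left = 0
--     for i, x in enumerate(lst):
--         here = 1 if is_True(x) else 0
--         diff = abs(left - (total - left - here))
--         if best_index == -1 or diff < best_diff: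
--             best_diff = diff
--             best_index = i
--         left += here
--     return best_index
-- ===== Notes on version B (the rewrite author's own statement) =====
-- stated objective: faster
-- what changed: Replaced the per-index re-summation of both slices with one total True count plus a running left count kept in a single pass, giving O(1) work per index.
import Mathlib
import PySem

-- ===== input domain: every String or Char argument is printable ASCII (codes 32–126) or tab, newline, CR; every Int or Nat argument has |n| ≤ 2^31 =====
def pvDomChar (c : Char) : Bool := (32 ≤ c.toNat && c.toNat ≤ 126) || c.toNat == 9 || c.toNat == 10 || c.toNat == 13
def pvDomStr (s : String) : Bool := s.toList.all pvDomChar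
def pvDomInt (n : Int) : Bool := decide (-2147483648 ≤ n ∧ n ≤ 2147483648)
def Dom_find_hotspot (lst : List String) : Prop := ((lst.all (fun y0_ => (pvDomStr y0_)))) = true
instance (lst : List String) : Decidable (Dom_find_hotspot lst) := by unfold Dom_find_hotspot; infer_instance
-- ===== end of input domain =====

-- B: one pass with a precomputed total True count and a running left count instead of re-summing both slices per index (O(n) vs O(n^2)).
-- ===== PORT A =====
-- helper is_True, shared by both Pythons
def isTrueP (s : String) : Bool := s == "y" || s == "?"

-- sum(1 for x in xs if is_True(x)), as both Pythons write it
def sumTrue (xs : List String) : Int :=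
  ((xs.filter (fun x => isTrueP x)).map (fun _ => (1 : Int))).sum

def find_hotspot (lst : List String) : Int :=
  let n : Int := lst.length
  -- min_diff = inf modelled as none
  let st := (PySem.List.pyRange 0 n 1).foldl
    (fun (st : Option Int × Int) i =>
      let left_count := sumTrue (PySem.List.slice lst none (some i))
      let right_count := sumTrue (PySem.List.slice lst (some (i + 1)) none)
      let diff := |left_count - right_count|
      match st.1 with
      | none => (some diff, i)
      | some m => if diff < m then (some diff, i) else st)
    (none, -1)
  st.2

-- ===== PORT B =====
def find_hotspot_alt (lst : List String) : Int :=
  let total := sumTrue lst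
  let st := (PySem.List.enumerate lst 0).foldl
    (fun (st : Int × Int × Int) (p : Int × String) =>
      let bd := st.1; let bi := st.2.1; let left := st.2.2
      let here : Int := if isTrueP p.2 then 1 else 0
      let diff := |left - (total - left - here)|
      if bi == -1 || diff < bd then (diff, p.1, left + here)
      else (bd, bi, left + here))
    (-1, -1, 0)
  st.2.1

-- ===== PRECONDITION & SPEC =====
def Spec_find_hotspot (lst : List String) (out : Int) : Prop := out = find_hotspot_alt lst
instance (lst : List String) (out : Int) : Decidable (Spec_find_hotspot lst out) := by unfold Spec_find_hotspot; infer_instance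

-- ===== CLAIM (what is proved, stated in full; the proofs are below) =====
def Claim_equal_find_hotspot : Prop := ∀ (lst : List String), Dom_find_hotspot lst → Spec_find_hotspot lst (find_hotspot lst)

-- ===== LEMMAS AND PROOFS =====

lemma sumTrue_eq (xs : List String) :
    sumTrue xs = (xs.countP (fun x => isTrueP x) : Int) := by
  simp [sumTrue, List.countP_eq_length_filter]

lemma loop_eq (lst : List String) (ys : List String) (k : Nat)
    (stA : Option Int × Int) (stB : Int × Int × Int)
    (hdrop : lst.drop k = ys)
    (hleft : stB.2.2 = ((lst.take k).countP (fun x => isTrueP x) : Int))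
    (hrel : (stA.1 = none ∧ stA.2 = -1 ∧ stB.2.1 = -1) ∨
            (∃ m, stA.1 = some m ∧ stB.1 = m ∧ stB.2.1 = stA.2 ∧ stA.2 ≠ -1)) :
    ((PySem.List.pyRange (k : Int) (lst.length : Int) 1).foldl
      (fun (st : Option Int × Int) i =>
        let left_count := sumTrue (PySem.List.slice lst none (some i))
        let right_count := sumTrue (PySem.List.slice lst (some (i + 1)) none)
        let diff := |left_count - right_count|
        match st.1 with
        | none => (some diff, i)
        | some m => if diff < m then (some diff, i) else st) stA).2 =
    ((PySem.List.enumerate ys (k : Int)).foldl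
      (fun (st : Int × Int × Int) (p : Int × String) =>
        let bd := st.1; let bi := st.2.1; let left := st.2.2
        let here : Int := if isTrueP p.2 then 1 else 0
        let diff := |left - (sumTrue lst - left - here)|
        if bi == -1 || diff < bd then (diff, p.1, left + here)
        else (bd, bi, left + here)) stB).2.1 := by
  induction ys generalizing k stA stB with
  | nil =>
    have hk : lst.length ≤ k := by
      have := List.drop_eq_nil_iff.mp hdrop; omega
    rw [PySem.List.pyRange_one_eq_nil (by exact_mod_cast hk)]
    simp only [PySem.List.enumerate_nil, List.foldl_nil]
    rcases hrel with ⟨_, h2, h3⟩ | ⟨m, _, _, h3, _⟩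
    · rw [h2, h3]
    · rw [h3]
  | cons y ys' ih =>
    obtain ⟨a1, a2⟩ := stA
    obtain ⟨b1, b2, b3⟩ := stB
    simp only at hleft hrel
    have hk : k < lst.length := by
      have := congrArg List.length hdrop
      simp at this; omega
    have hy : lst.drop k = y :: ys' := hdrop
    have hdrop' : lst.drop (k + 1) = ys' := by
      rw [← List.tail_drop, hy, List.tail_cons]
    have hslice1 : PySem.List.slice lst none (some (k : Int)) = lst.take k :=
      PySem.List.slice_to_natCast lst k
    have hslice2 : PySem.List.slice lst (some ((k : Int) + 1)) none = lst.drop (k + 1) := by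
      have := PySem.List.slice_from_natCast lst (k + 1)
      push_cast at this
      exact this
    have hcount : (lst.countP (fun x => isTrueP x) : Int)
        = ((lst.take k).countP (fun x => isTrueP x) : Int)
          + (if isTrueP y then (1 : Int) else 0)
          + ((lst.drop (k + 1)).countP (fun x => isTrueP x) : Int) := by
      conv_lhs => rw [← List.take_append_drop k lst]
      rw [List.countP_append, hy, List.countP_cons, hdrop']
      split_ifs <;> push_cast <;> omega
    have hdiffeq :
        |sumTrue (PySem.List.slice lst none (some (k : Int)))
          - sumTrue (PySem.List.slice lst (some ((k : Int) + 1)) none)|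
        = |b3 - (sumTrue lst - b3 - (if isTrueP y then (1 : Int) else 0))| := by
      rw [hslice1, hslice2, sumTrue_eq, sumTrue_eq, sumTrue_eq, hleft]
      congr 1
      rw [hcount]; ring
    have hleft' : b3 + (if isTrueP y then (1 : Int) else 0)
        = ((lst.take (k + 1)).countP (fun x => isTrueP x) : Int) := by
      have hget : lst[k]? = some y := by
        have h0 : (lst.drop k)[0]? = some y := by rw [hy]; rfl
        simpa using h0
      rw [List.take_add_one, hget]
      simp only [Option.toList_some, List.countP_append, List.countP_cons, List.countP_nil]
      rw [hleft]
      split_ifs <;> push_cast <;> omega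
    rw [PySem.List.pyRange_one_cons (by exact_mod_cast hk), PySem.List.enumerate_cons]
    simp only [List.foldl_cons]
    rcases hrel with ⟨h1, h2, h3⟩ | ⟨m, h1, h2, h3, h4⟩
    · subst h1 h2 h3
      simp only [beq_self_eq_true, Bool.true_or, if_true]
      have := ih (k + 1)
        (some (|sumTrue (PySem.List.slice lst none (some (k : Int)))
          - sumTrue (PySem.List.slice lst (some ((k : Int) + 1)) none)|), (k : Int))
        (|b3 - (sumTrue lst - b3 - (if isTrueP y then (1 : Int) else 0))|,
          (k : Int), b3 + (if isTrueP y then (1 : Int) else 0))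
        hdrop' hleft'
        (Or.inr ⟨|sumTrue (PySem.List.slice lst none (some (k : Int)))
          - sumTrue (PySem.List.slice lst (some ((k : Int) + 1)) none)|,
          rfl, hdiffeq.symm, rfl, by omega⟩)
      push_cast at this
      exact this
    · have hbeq : (a2 == (-1 : Int)) = false := by simpa using h4
      simp only [h1, h2, h3, hbeq, Bool.false_or]
      rw [hdiffeq]
      by_cases hc : |b3 - (sumTrue lst - b3 - (if isTrueP y then (1 : Int) else 0))| < m
      · rw [if_pos hc, if_pos (decide_eq_true hc)]
        have := ih (k + 1)
          (some (|sumTrue (PySem.List.slice lst none (some (k : Int)))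
            - sumTrue (PySem.List.slice lst (some ((k : Int) + 1)) none)|), (k : Int))
          (|b3 - (sumTrue lst - b3 - (if isTrueP y then (1 : Int) else 0))|,
            (k : Int), b3 + (if isTrueP y then (1 : Int) else 0))
          hdrop' hleft'
          (Or.inr ⟨|sumTrue (PySem.List.slice lst none (some (k : Int)))
            - sumTrue (PySem.List.slice lst (some ((k : Int) + 1)) none)|,
            rfl, hdiffeq.symm, rfl, by omega⟩)
        push_cast at this
        rw [hdiffeq] at this
        exact this
      · rw [if_neg hc, if_neg (by simpa using hc)]

        have := ih (k + 1) (some m, a2)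
          (m, a2, b3 + (if isTrueP y then (1 : Int) else 0))
          hdrop' hleft' (Or.inr ⟨m, rfl, rfl, rfl, h4⟩)
        push_cast at this
        exact this

-- ===== VERDICT (by name: the statement is the Claim_ definition above) =====
theorem find_hotspot_spec : Claim_equal_find_hotspot := by
  intro lst _
  unfold Spec_find_hotspot find_hotspot find_hotspot_alt
  simpa using loop_eq lst lst 0 (none, -1) (-1, -1, 0) (by simp) (by simp) (Or.inl (by simp))
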